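-- pv_equiv track=rewrite | github.com/RaydenXVII/qbit_case | Case 1 dan 2/Case1.py | mengelompokkanBuah
-- ===== SOURCE A (Python) =====
-- def mengelompokkanBuah(data_buah):
--     wadah_buah_awal = {}
--
--     for buah in data_buah:
--         tipe_buah = buah['fruitType']
--         nama_buah = buah['fruitName']
--
--         if tipe_buah in wadah_buah_awal:
--             wadah_buah_awal[tipe_buah].append(nama_buah)
--         else:
--             wadah_buah_awal[tipe_buah] = [nama_buah]
--
--     wadah_buah_akhir = {}
--     for tipe_buah, daftar_nama in wadah_buah_awal.items():
--         nama = [nama_buah.lower() for nama_buah in daftar_nama]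
--         nama_unik = set(nama)
--         nama_rapi = sorted([nama.capitalize() for nama in nama_unik])
--
--         wadah_buah_akhir[tipe_buah] = nama_rapi
--     return wadah_buah_akhir
-- ===== SOURCE B (Python) =====
-- def mengelompokkanBuah(data_buah):
--     urutan = {}
--     pasangan = set()
--     for buah in data_buah:
--         tipe = buah['fruitType']
--         urutan[tipe] = None
--         pasangan.add((tipe, buah['fruitName'].capitalize()))
--     kelompok = {}
--     for tipe, nama in sorted(pasangan):
--         kelompok[tipe] = kelompok.get(tipe, []) + [nama]
--     return {tipe: kelompok.get(tipe, []) for tipe in urutan}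
-- ===== Notes on version B (the rewrite author's own statement) =====
-- stated objective: alternative
-- what changed: B replaces A's group-then-per-type-lower/set-dedup/capitalize/sort with one pass building a deduplicating set of (type, capitalized name) pairs plus one global lexicographic sort, then a single grouping pass over the sorted pairs.
import Mathlib
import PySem

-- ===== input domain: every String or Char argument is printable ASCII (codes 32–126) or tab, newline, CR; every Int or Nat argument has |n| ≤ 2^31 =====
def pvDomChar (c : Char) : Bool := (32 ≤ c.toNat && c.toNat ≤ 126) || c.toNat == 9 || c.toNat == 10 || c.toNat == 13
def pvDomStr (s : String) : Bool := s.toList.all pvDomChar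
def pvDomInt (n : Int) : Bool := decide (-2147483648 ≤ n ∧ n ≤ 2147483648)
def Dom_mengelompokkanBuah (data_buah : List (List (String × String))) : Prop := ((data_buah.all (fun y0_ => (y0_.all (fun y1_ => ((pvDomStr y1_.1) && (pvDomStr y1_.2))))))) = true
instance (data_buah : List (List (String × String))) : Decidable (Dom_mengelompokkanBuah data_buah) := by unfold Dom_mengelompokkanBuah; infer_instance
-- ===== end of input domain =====

-- B groups by one global sort of a deduplicated (type, capitalized-name) pair set instead of A's
-- per-type group / lower / set-dedup / capitalize / sort; objective: alternative decomposition.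

-- Python str.capitalize, exact on ASCII (title-case of the first char = upper-case there);
-- shared by both ports because both Pythons call str.capitalize (A on already-lowered strings).
def pyCapitalize (s : String) : String :=
  match s.toList with
  | [] => ""
  | c :: rest => String.ofList (PySem.Chars.upperChar c :: PySem.Chars.lower rest)

-- ===== PORT A =====
def mengelompokkanBuah (data_buah : List (List (String × String))) : List (String × List String) :=
  -- first loop: group names by type (the key lookups are total under Pre_, so getD "" is never used)
  let awal : PySem.Dict String (List String) :=
    data_buah.foldl (fun w buah =>
      let t := ((PySem.Dict.ofList buah).get? "fruitType").getD ""
      let n := ((PySem.Dict.ofList buah).get? "fruitName").getD ""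
      if w.contains t then w.modify t [] (fun l => l ++ [n]) else w.insert t [n])
      PySem.Dict.empty
  -- second loop: lower, dedup via set, capitalize, sort per type
  let akhir : PySem.Dict String (List String) :=
    awal.items.foldl (fun w p =>
      let nama := p.2.map PySem.Str.lower
      let namaUnik : PySem.Set String := PySem.Set.ofList nama
      let namaRapi := PySem.List.sorted (namaUnik.map pyCapitalize) (fun x => x) false
      w.insert p.1 namaRapi)
      PySem.Dict.empty
  akhir.items

-- ===== PORT B =====
def mengelompokkanBuah_alt (data_buah : List (List (String × String))) : List (String × List String) :=
  -- one pass: insertion-ordered key dict 'urutan' and the deduplicating set of (type, capitalized name) pairs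
  let st : PySem.Dict String Unit × PySem.Set (String × String) :=
    data_buah.foldl (fun st buah =>
      let t := ((PySem.Dict.ofList buah).get? "fruitType").getD ""
      (st.1.insert t (), st.2.add (t, pyCapitalize (((PySem.Dict.ofList buah).get? "fruitName").getD ""))))
      (PySem.Dict.empty, PySem.Set.empty)
  -- one global sort of the pair set (Python tuple order = sorted2 on both components)
  let sortedPairs := PySem.List.sorted2 st.2 (fun p => p.1) (fun p => p.2) false
  -- single grouping pass over the sorted pairs: kelompok[tipe] = kelompok.get(tipe, []) + [nama]
  let kelompok : PySem.Dict String (List String) :=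
    sortedPairs.foldl (fun k p => k.insert p.1 (k.getD p.1 [] ++ [p.2])) PySem.Dict.empty
  -- final dict comprehension keyed in first-appearance order
  (st.1.keys.foldl (fun d t => d.insert t (kelompok.getD t []))
    (PySem.Dict.empty : PySem.Dict String (List String))).items

-- ===== PRECONDITION & SPEC =====
-- Pre_ excludes exactly the rows missing a 'fruitType' or 'fruitName' key, on which Python A raises KeyError.
def Pre_mengelompokkanBuah (data_buah : List (List (String × String))) : Prop :=
  ∀ buah ∈ data_buah, ("fruitType" ∈ buah.map Prod.fst ∧ "fruitName" ∈ buah.map Prod.fst)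
instance (data_buah : List (List (String × String))) : Decidable (Pre_mengelompokkanBuah data_buah) := by unfold Pre_mengelompokkanBuah; infer_instance

def pvWitness_mengelompokkanBuah : (List (List (String × String))) :=
  [[("fruitType", "buah lokal"), ("fruitName", "Apel")],
   [("fruitType", "buah lokal"), ("fruitName", "apel")]]

def Spec_mengelompokkanBuah (data_buah : List (List (String × String))) (out : List (String × List String)) : Prop := out = mengelompokkanBuah_alt data_buah
instance (data_buah : List (List (String × String))) (out : List (String × List String)) : Decidable (Spec_mengelompokkanBuah data_buah out) := by unfold Spec_mengelompokkanBuah; infer_instance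

-- ===== CLAIM (what is proved, stated in full; the proofs are below) =====
def Claim_equal_mengelompokkanBuah : Prop := ∀ (data_buah : List (List (String × String))), Dom_mengelompokkanBuah data_buah → Pre_mengelompokkanBuah data_buah → Spec_mengelompokkanBuah data_buah (mengelompokkanBuah data_buah)

-- ===== LEMMAS AND PROOFS =====

-- proof-side abbreviations for the row accessors both ports use
def tOf (buah : List (String × String)) : String := ((PySem.Dict.ofList buah).get? "fruitType").getD ""
def nOf (buah : List (String × String)) : String := ((PySem.Dict.ofList buah).get? "fruitName").getD ""
def rowsOf (data : List (List (String × String))) : List (String × String) :=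
  data.map (fun b => (tOf b, nOf b))

-- char-level facts about Python's ASCII case maps
theorem char_le_iff (a b : Char) : a ≤ b ↔ a.toNat ≤ b.toNat := by
  rw [Char.le_def, UInt32.le_iff_toNat_le]; rfl

theorem up_low (c : Char) : PySem.Chars.lowerChar (PySem.Chars.upperChar c) = PySem.Chars.lowerChar c := by
  have eA : 'A'.toNat = 65 := rfl
  have eZ : 'Z'.toNat = 90 := rfl
  have ea : 'a'.toNat = 97 := rfl
  have ez : 'z'.toNat = 122 := rfl
  unfold PySem.Chars.lowerChar PySem.Chars.upperChar PySem.Chars.islower PySem.Chars.isupper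
  by_cases hl : 'a' ≤ c ∧ c ≤ 'z'
  · have h1 : c.toNat ≤ 122 := by have := (char_le_iff _ _).mp hl.2; omega
    have h0 : 97 ≤ c.toNat := by have := (char_le_iff _ _).mp hl.1; omega
    have hv : (Char.ofNat (c.toNat - 32)).toNat = c.toNat - 32 := by
      rw [Char.toNat_ofNat]; simp [Nat.isValidChar]; omega
    simp only [hl.1, hl.2, decide_true, Bool.and_self, if_true]
    have hA : ('A' ≤ Char.ofNat (c.toNat - 32)) := by rw [char_le_iff, hv]; omega
    have hZ : (Char.ofNat (c.toNat - 32) ≤ 'Z') := by rw [char_le_iff, hv]; omega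
    have hnotup : ¬ ('A' ≤ c ∧ c ≤ 'Z') := by
      rintro ⟨a, b⟩; have := (char_le_iff _ _).mp b; omega
    simp only [hA, hZ, decide_true, Bool.and_self, if_true]
    rw [hv]
    have h2 : c.toNat - 32 + 32 = c.toNat := by omega
    rw [h2, Char.ofNat_toNat]
    split_ifs with h
    · exfalso
      rw [Bool.and_eq_true_iff, decide_eq_true_iff, decide_eq_true_iff] at h
      exact hnotup h
    · rfl
  · have h2 : (decide ('a' ≤ c) && decide (c ≤ 'z')) = false := by
      rcases Decidable.not_and_iff_or_not.mp hl with h | h <;> simp [h]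
    simp [h2]

theorem low_low (c : Char) : PySem.Chars.lowerChar (PySem.Chars.lowerChar c) = PySem.Chars.lowerChar c := by
  have eA : 'A'.toNat = 65 := rfl
  have eZ : 'Z'.toNat = 90 := rfl
  unfold PySem.Chars.lowerChar PySem.Chars.isupper
  by_cases hu : 'A' ≤ c ∧ c ≤ 'Z'
  · have h1 : c.toNat ≤ 90 := by have := (char_le_iff _ _).mp hu.2; omega
    have h0 : 65 ≤ c.toNat := by have := (char_le_iff _ _).mp hu.1; omega
    have hv : (Char.ofNat (c.toNat + 32)).toNat = c.toNat + 32 := by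
      rw [Char.toNat_ofNat]; simp [Nat.isValidChar]; omega
    simp only [hu.1, hu.2, decide_true, Bool.and_self, if_true]
    have hA : ¬ ('A' ≤ Char.ofNat (c.toNat + 32) ∧ Char.ofNat (c.toNat + 32) ≤ 'Z') := by
      rintro ⟨a, b⟩; rw [char_le_iff, hv] at b; omega
    split_ifs with h
    · exfalso
      rw [Bool.and_eq_true_iff, decide_eq_true_iff, decide_eq_true_iff] at h
      exact hA h
    · rfl
  · have h2 : (decide ('A' ≤ c) && decide (c ≤ 'Z')) = false := by
      rcases Decidable.not_and_iff_or_not.mp hu with h | h <;> simp [h]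
    simp [h2]

theorem up_of_low (c : Char) : PySem.Chars.upperChar (PySem.Chars.lowerChar c) = PySem.Chars.upperChar c := by
  have eA : 'A'.toNat = 65 := rfl
  have eZ : 'Z'.toNat = 90 := rfl
  have ea : 'a'.toNat = 97 := rfl
  have ez : 'z'.toNat = 122 := rfl
  unfold PySem.Chars.lowerChar PySem.Chars.upperChar PySem.Chars.islower PySem.Chars.isupper
  by_cases hu : 'A' ≤ c ∧ c ≤ 'Z'
  · have h1 : c.toNat ≤ 90 := by have := (char_le_iff _ _).mp hu.2; omega
    have h0 : 65 ≤ c.toNat := by have := (char_le_iff _ _).mp hu.1; omega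
    have hv : (Char.ofNat (c.toNat + 32)).toNat = c.toNat + 32 := by
      rw [Char.toNat_ofNat]; simp [Nat.isValidChar]; omega
    simp only [hu.1, hu.2, decide_true, Bool.and_self, if_true]
    have ha : ('a' ≤ Char.ofNat (c.toNat + 32)) := by rw [char_le_iff, hv]; omega
    have hz2 : (Char.ofNat (c.toNat + 32) ≤ 'z') := by rw [char_le_iff, hv]; omega
    have hnotlow : ¬ ('a' ≤ c ∧ c ≤ 'z') := by
      rintro ⟨a, b⟩; have := (char_le_iff _ _).mp a; omega
    simp only [ha, hz2, decide_true, Bool.and_self, if_true]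
    rw [hv]
    have h2 : c.toNat + 32 - 32 = c.toNat := by omega
    rw [h2, Char.ofNat_toNat]
    split_ifs with h
    · exfalso
      rw [Bool.and_eq_true_iff, decide_eq_true_iff, decide_eq_true_iff] at h
      exact hnotlow h
    · rfl
  · have h2 : (decide ('A' ≤ c) && decide (c ≤ 'Z')) = false := by
      rcases Decidable.not_and_iff_or_not.mp hu with h | h <;> simp [h]
    simp [h2]

-- string-level corollaries
theorem lowerL_lowerL (l : List Char) : PySem.Chars.lower (PySem.Chars.lower l) = PySem.Chars.lower l := by
  simp [PySem.Chars.lower, List.map_map, Function.comp_def, low_low]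

theorem lower_lower (s : String) : PySem.Str.lower (PySem.Str.lower s) = PySem.Str.lower s := by
  simp [PySem.Str.lower, String.toList_ofList, lowerL_lowerL]

theorem cap_lower (s : String) : pyCapitalize (PySem.Str.lower s) = pyCapitalize s := by
  unfold pyCapitalize
  rw [PySem.Str.toList_lower]
  cases h : s.toList with
  | nil => simp [PySem.Chars.lower]
  | cons c cs => simp [PySem.Chars.lower, up_of_low, List.map_map, Function.comp_def, low_low]

theorem lower_cap (s : String) : PySem.Str.lower (pyCapitalize s) = PySem.Str.lower s := by
  unfold pyCapitalize
  cases h : s.toList with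
  | nil => simp [PySem.Str.lower, h]
  | cons c cs =>
      simp [PySem.Str.lower, h, String.toList_ofList, PySem.Chars.lower, up_low,
        List.map_map, Function.comp_def, low_low]

theorem cap_inj_on_lowered {x y : String}
    (hx : PySem.Str.lower x = x) (hy : PySem.Str.lower y = y)
    (h : pyCapitalize x = pyCapitalize y) : x = y := by
  calc x = PySem.Str.lower x := hx.symm
    _ = PySem.Str.lower (pyCapitalize x) := (lower_cap x).symm
    _ = PySem.Str.lower (pyCapitalize y) := by rw [h]
    _ = PySem.Str.lower y := lower_cap y
    _ = y := hy

-- A's branching step is exactly a dict 'modify'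
theorem stepA_eq_modify (w : PySem.Dict String (List String)) (t n : String) :
    (if w.contains t then w.modify t [] (fun l => l ++ [n]) else w.insert t [n]) =
      w.modify t [] (fun l => l ++ [n]) := by
  by_cases h : w.contains t
  · simp [h]
  · simp only [h, Bool.false_eq_true, if_false, PySem.Dict.modify]
    rw [PySem.Dict.getD_of_not_contains _ _ (by simpa using h)]
    simp

-- the grouping fold, shared by both sides
theorem getD_group_fold (l : List (String × String)) (d : PySem.Dict String (List String)) (t : String) :
    ((l.foldl (fun k p => k.modify p.1 [] (fun v => v ++ [p.2])) d).getD t []) =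
      d.getD t [] ++ (l.filter (fun p => p.1 == t)).map Prod.snd := by
  induction l generalizing d with
  | nil => simp
  | cons p rest ih =>
      simp only [List.foldl_cons, ih, List.filter_cons]
      by_cases h : p.1 = t
      · simp [h, PySem.Dict.getD_modify]
      · rw [PySem.Dict.getD_modify]; simp [h, Ne.symm h]

-- items of a dict with nodup keys, as a map over its keys
theorem items_eq_map_keys {ν : Type} (d : PySem.Dict String ν) (hnd : d.keys.Nodup) (v0 : ν) :
    d.items = d.keys.map (fun k => (k, d.getD k v0)) := by
  apply List.ext_getElem
  · simp [PySem.Dict.keys]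
  · intro i h1 h2
    have hk : d.keys[i]'(by simpa [PySem.Dict.keys] using h1) = (d.items[i]'h1).1 := by
      simp [PySem.Dict.keys]
    rw [List.getElem_map]
    have hmem : ((d.items[i]'h1).1, (d.items[i]'h1).2) ∈ d.items := by
      simpa using List.getElem_mem h1
    have := PySem.Dict.getD_of_mem_items d hmem hnd v0
    rw [hk, this]

-- folding fresh inserts over nodup keys
theorem items_foldl_insert {ν : Type} (ts : List String) (F : String → ν) (d : PySem.Dict String ν)
    (hnd : ts.Nodup) (hfresh : ∀ t ∈ ts, d.contains t = false) :
    (ts.foldl (fun d t => d.insert t (F t)) d).items = d.items ++ ts.map (fun t => (t, F t)) := by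
  induction ts generalizing d with
  | nil => simp
  | cons t rest ih =>
      simp only [List.foldl_cons, List.map_cons]
      rw [ih (d.insert t (F t)) hnd.of_cons]
      · rw [PySem.Dict.items_insert_of_not_contains _ _ (hfresh t (by simp))]
        simp
      · intro u hu
        have h1 : u ≠ t := fun h => (List.nodup_cons.mp hnd).1 (h ▸ hu)
        have h2 := hfresh u (by simp [hu])
        rw [PySem.Dict.contains_eq_decide_mem_keys] at h2 ⊢
        simp only [decide_eq_false_iff_not] at h2 ⊢
        simp [PySem.Dict.mem_keys_insert, h1, h2]

-- sorted2 on pairs is sorted by the lexicographic key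
theorem sorted2_eq_sorted_lex (xs : List (String × String)) :
    PySem.List.sorted2 xs (fun p => p.1) (fun p => p.2) false =
      PySem.List.sorted xs (fun p => toLex p) false := by
  unfold PySem.List.sorted2 PySem.List.sorted
  simp only [Bool.false_eq_true]
  congr 1
  funext acc x
  congr 1
  funext a b
  rcases lt_trichotomy a.1 b.1 with h | h | h
  · simp [h, Prod.Lex.lt_iff, not_lt_of_gt h]
  · simp [h, lt_irrefl, Prod.Lex.lt_iff]
  · simp [h, not_lt_of_gt h, Prod.Lex.lt_iff, ne_of_gt h]

-- the per-type core: A's sort of the capitalized dedup set = B's slice of the global sort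
theorem per_type_core (rows : List (String × String)) (t : String) :
    PySem.List.sorted
      ((PySem.Set.ofList (((rows.filter (fun r => r.1 == t)).map Prod.snd).map PySem.Str.lower)).map pyCapitalize)
      (fun x => x) false =
    ((PySem.List.sorted (PySem.Set.ofList (rows.map (fun r => (r.1, pyCapitalize r.2)))) (fun p => toLex p) false).filter
        (fun p => p.1 == t)).map Prod.snd := by
  set caps := rows.map (fun r => (r.1, pyCapitalize r.2)) with hcaps
  set P : List (String × String) := PySem.Set.ofList caps with hP
  set S := PySem.List.sorted P (fun p => toLex p) false with hS
  set Aun := (PySem.Set.ofList (((rows.filter (fun r => r.1 == t)).map Prod.snd).map PySem.Str.lower)).map pyCapitalize with hAun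
  have hndP : P.Nodup := PySem.Set.nodup_ofList _
  have hpermS : S.Perm P := PySem.List.sorted_perm _ _ _
  have hndS : S.Nodup := hpermS.nodup_iff.mpr hndP
  have hle : S.Pairwise (fun a b => toLex a ≤ toLex b) := PySem.List.sorted_pairwise _ _
  have hlt : S.Pairwise (fun a b => toLex a < toLex b) := by
    refine (hle.and hndS).imp ?_
    rintro a b ⟨h1, h2⟩
    exact lt_of_le_of_ne h1 (by simpa using h2)
  have hpw : (((S.filter (fun p => p.1 == t)).map Prod.snd)).Pairwise (fun a b => a < b) := by
    rw [List.pairwise_map]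
    refine List.Pairwise.imp_of_mem ?_ (hlt.filter _)
    intro a b ha hb hab
    have ha1 : a.1 = t := by simpa using (List.mem_filter.mp ha).2
    have hb1 : b.1 = t := by simpa using (List.mem_filter.mp hb).2
    rcases Prod.Lex.lt_iff.mp hab with h | h
    · simp only [ofLex_toLex] at h; rw [ha1, hb1] at h; exact absurd h (lt_irrefl t)
    · simpa using h.2
  have hstep1 : ((S.filter (fun p => p.1 == t)).map Prod.snd).Perm ((P.filter (fun p => p.1 == t)).map Prod.snd) :=
    (hpermS.filter _).map _
  have hndL : ((P.filter (fun p => p.1 == t)).map Prod.snd).Nodup := by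
    refine (hndP.filter _).map_on ?_
    intro q hq q' hq' hsnd
    have h1 : q.1 = t := by simpa using (List.mem_filter.mp hq).2
    have h2 : q'.1 = t := by simpa using (List.mem_filter.mp hq').2
    exact Prod.ext (h1.trans h2.symm) hsnd
  have hndA : Aun.Nodup := by
    refine (PySem.Set.nodup_ofList _).map_on ?_
    intro z hz z' hz' hc
    have hzl : PySem.Str.lower z = z := by
      have := (PySem.Set.mem_ofList _ _).mp hz
      rcases List.mem_map.mp this with ⟨w, _, rfl⟩
      exact lower_lower w
    have hzl' : PySem.Str.lower z' = z' := by
      have := (PySem.Set.mem_ofList _ _).mp hz'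
      rcases List.mem_map.mp this with ⟨w, _, rfl⟩
      exact lower_lower w
    exact cap_inj_on_lowered hzl hzl' hc
  have hmem : ∀ x, x ∈ ((P.filter (fun p => p.1 == t)).map Prod.snd) ↔ x ∈ Aun := by
    intro x
    simp only [hAun, hP, hcaps, List.mem_map, List.mem_filter, PySem.Set.mem_ofList, beq_iff_eq]
    constructor
    · rintro ⟨q, ⟨⟨r, hr, rfl⟩, hq1⟩, rfl⟩
      exact ⟨PySem.Str.lower r.2, ⟨r.2, ⟨r, ⟨hr, by simpa using hq1⟩, rfl⟩, rfl⟩, cap_lower r.2⟩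
    · rintro ⟨z, ⟨w, ⟨r, ⟨hr, hr1⟩, rfl⟩, rfl⟩, rfl⟩
      exact ⟨(r.1, pyCapitalize r.2), ⟨⟨r, hr, rfl⟩, by simpa using hr1⟩, (cap_lower r.2).symm⟩
  have hstep2 : ((P.filter (fun p => p.1 == t)).map Prod.snd).Perm Aun := by
    refine List.perm_of_nodup_nodup_toFinset_eq hndL hndA ?_
    ext x
    simp only [List.mem_toFinset]
    exact hmem x
  have hperm : ((S.filter (fun p => p.1 == t)).map Prod.snd).Perm Aun := hstep1.trans hstep2
  exact (PySem.List.sorted_eq_of_perm_of_pairwise_lt _ _ _ hperm hpw)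

-- A's output in normal form: first-appearance types, per-type dedup-lower-capitalize-sort
theorem A_normal (data : List (List (String × String))) :
    mengelompokkanBuah data =
      (PySem.Set.ofList ((rowsOf data).map Prod.fst)).map (fun u =>
        (u, PySem.List.sorted
          ((PySem.Set.ofList ((((rowsOf data).filter (fun r => r.1 == u)).map Prod.snd).map PySem.Str.lower)).map pyCapitalize)
          (fun x => x) false)) := by
  simp only [mengelompokkanBuah]
  set T := PySem.Set.ofList ((rowsOf data).map Prod.fst) with hT
  have hstep : (fun (w : PySem.Dict String (List String)) (buah : List (String × String)) =>
      let t := ((PySem.Dict.ofList buah).get? "fruitType").getD ""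
      let n := ((PySem.Dict.ofList buah).get? "fruitName").getD ""
      if w.contains t then w.modify t [] (fun l => l ++ [n]) else w.insert t [n]) =
      (fun w buah => w.modify (tOf buah) [] (fun l => l ++ [nOf buah])) := by
    funext w buah
    exact stepA_eq_modify w (tOf buah) (nOf buah)
  rw [hstep]
  have hfoldmap : data.foldl (fun w buah => w.modify (tOf buah) [] (fun l => l ++ [nOf buah])) PySem.Dict.empty
      = (rowsOf data).foldl (fun k p => k.modify p.1 [] (fun v => v ++ [p.2])) PySem.Dict.empty := by
    rw [rowsOf, List.foldl_map]
  rw [hfoldmap]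
  set awal := (rowsOf data).foldl (fun k p => k.modify p.1 [] (fun v => v ++ [p.2])) PySem.Dict.empty with hawal
  have hkeys : awal.keys = T := by
    rw [hawal, PySem.Dict.keys_foldl_modify_key (rowsOf data) Prod.fst [] (fun _ p v => v ++ [p.2])]
    simp [PySem.Set.update_nil_left, hT]
  have hndT : T.Nodup := PySem.Set.nodup_ofList _
  have hitems : awal.items = T.map (fun u => (u, ((rowsOf data).filter (fun r => r.1 == u)).map Prod.snd)) := by
    rw [items_eq_map_keys awal (by rw [hkeys]; exact hndT) [], hkeys]
    refine List.map_congr_left ?_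
    intro u _
    rw [hawal, getD_group_fold]
    simp
  rw [hitems, List.foldl_map]
  rw [items_foldl_insert T _ PySem.Dict.empty hndT (by intro u _; simp [PySem.Dict.contains_empty])]
  simp [PySem.Dict.empty]

-- B's output in normal form: first-appearance types, per-type slice of the global sort
theorem B_normal (data : List (List (String × String))) :
    mengelompokkanBuah_alt data =
      (PySem.Set.ofList ((rowsOf data).map Prod.fst)).map (fun u =>
        (u, ((PySem.List.sorted (PySem.Set.ofList ((rowsOf data).map (fun r => (r.1, pyCapitalize r.2)))) (fun p => toLex p) false).filter
              (fun p => p.1 == u)).map Prod.snd)) := by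
  simp only [mengelompokkanBuah_alt]
  set T := PySem.Set.ofList ((rowsOf data).map Prod.fst) with hT
  have hsplit := PySem.List.foldl_prod_mk
      (fun (d : PySem.Dict String Unit) (b : List (String × String)) => d.insert (((PySem.Dict.ofList b).get? "fruitType").getD "") ())
      (fun (s : PySem.Set (String × String)) (b : List (String × String)) => s.add ((((PySem.Dict.ofList b).get? "fruitType").getD ""), pyCapitalize (((PySem.Dict.ofList b).get? "fruitName").getD "")))
      data PySem.Dict.empty PySem.Set.empty
  rw [hsplit]
  simp only [show (fun (d : PySem.Dict String Unit) (b : List (String × String)) => d.insert (((PySem.Dict.ofList b).get? "fruitType").getD "") ()) = (fun d b => d.insert (tOf b) ()) from rfl,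
    show (fun (s : PySem.Set (String × String)) (b : List (String × String)) => s.add ((((PySem.Dict.ofList b).get? "fruitType").getD ""), pyCapitalize (((PySem.Dict.ofList b).get? "fruitName").getD ""))) = (fun s b => s.add (tOf b, pyCapitalize (nOf b))) from rfl]
  have hkeys : (data.foldl (fun d b => d.insert (tOf b) ()) PySem.Dict.empty).keys = T := by
    rw [PySem.Dict.keys_foldl_insert_key data tOf (fun _ _ => ())]
    have : data.map tOf = (rowsOf data).map Prod.fst := by
      simp [rowsOf, List.map_map, Function.comp_def]
    simp [PySem.Set.update_nil_left, this, hT]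
  have hset : data.foldl (fun s b => s.add (tOf b, pyCapitalize (nOf b))) PySem.Set.empty
      = PySem.Set.ofList ((rowsOf data).map (fun r => (r.1, pyCapitalize r.2))) := by
    rw [← PySem.Set.update_map_eq_foldl_add data (fun b => (tOf b, pyCapitalize (nOf b))) PySem.Set.empty]
    have : data.map (fun b => (tOf b, pyCapitalize (nOf b))) = (rowsOf data).map (fun r => (r.1, pyCapitalize r.2)) := by
      simp [rowsOf, List.map_map, Function.comp_def]
    rw [this]
    exact PySem.Set.update_nil_left _
  rw [hkeys, hset, sorted2_eq_sorted_lex]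
  set S := PySem.List.sorted (PySem.Set.ofList ((rowsOf data).map (fun r => (r.1, pyCapitalize r.2)))) (fun p => toLex p) false with hS
  have hstep : (fun (k : PySem.Dict String (List String)) (p : String × String) => k.insert p.1 (k.getD p.1 [] ++ [p.2]))
      = (fun k p => k.modify p.1 [] (fun v => v ++ [p.2])) := rfl
  rw [hstep]
  rw [items_foldl_insert T _ PySem.Dict.empty
        (PySem.Set.nodup_ofList _) (by intro u _; simp [PySem.Dict.contains_empty])]
  · have hemp : (PySem.Dict.empty : PySem.Dict String (List String)).items = [] := rfl
    rw [hemp, List.nil_append]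
    refine List.map_congr_left ?_
    intro u _
    rw [getD_group_fold]
    simp

-- ===== VERDICT (by name: the statement is the Claim_ definition above) =====
theorem mengelompokkanBuah_spec : Claim_equal_mengelompokkanBuah := by
  intro data _ _
  unfold Spec_mengelompokkanBuah
  rw [A_normal, B_normal]
  refine List.map_congr_left ?_
  intro u _
  rw [per_type_core]
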